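-- pv_equiv track=rewrite | github.com/lexoz-bedra/algorithms-ICT | s2/2-1-greedy_DP/2-1-zhadnye-algoritmy-dinamicheskoe-programmirovanie-lexoz-bedra-main/Задачи по варианту/task5.py | max_prize
-- ===== SOURCE A (Python) =====
-- def max_prize(n: int) -> list:
--     if n == 1:
--         return [1]
--     if n == 2:
--         return [2]
--     prizes = [0]
--     while n > max(prizes):
--         maxx = max(prizes)
--         if n - (maxx + 1) not in prizes:
--             prizes.append(maxx + 1)
--             n -= (maxx + 1)
--         else:
--             prizes.append(n)
--     prizes.remove(0)
--     return sorted(prizes)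
-- ===== SOURCE B (Python) =====
-- def max_prize(n: int) -> list:
--     if n <= 0:
--         return []
--     k = 1
--     while (k + 1) * (k + 2) // 2 <= n:
--         k += 1
--     rem = n - k * (k + 1) // 2
--     return list(range(1, k)) + [k + rem]
-- ===== Notes on version B (the rewrite author's own statement) =====
-- stated objective: faster
-- what changed: Replaces the list-growing greedy loop with its max() and membership scans by a direct O(sqrt n) search for the largest k with k(k+1)/2 <= n and the closed-form answer list(range(1,k)) + [k + remainder].
-- intended difference: For n >= 5 with n+1 triangular (n = k(k+1)/2 - 1), A drops the final remainder and returns a list summing to less than n (at the witness n=5 it returns [1, 2]), while B returns a maximal distinct partition actually summing to n ([1, 4] at n=5), which is the intended prize partition. — e.g. on max_prize(5): A returns [1, 2], B returns [1, 4]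
import Mathlib
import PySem

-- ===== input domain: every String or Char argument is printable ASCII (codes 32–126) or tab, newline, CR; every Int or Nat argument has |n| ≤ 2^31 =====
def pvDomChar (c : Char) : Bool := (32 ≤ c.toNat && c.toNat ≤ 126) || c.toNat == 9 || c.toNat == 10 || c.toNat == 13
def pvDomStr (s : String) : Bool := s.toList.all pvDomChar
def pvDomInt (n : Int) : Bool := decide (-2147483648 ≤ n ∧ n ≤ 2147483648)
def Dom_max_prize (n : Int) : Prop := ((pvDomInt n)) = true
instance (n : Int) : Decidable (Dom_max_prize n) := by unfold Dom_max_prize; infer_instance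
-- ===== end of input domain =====

set_option maxRecDepth 4096


-- B computes the answer in closed form from the largest k with k(k+1)/2 ≤ n (an O(√n) search)
-- instead of A's greedy loop that grows a list and rescans it with max()/membership each turn;
-- on n = k(k+1)/2 - 1 (n ≥ 5) A loses the final remainder and B returns the intended partition (see D_).

-- ===== PORT A =====
-- the while-loop of A; fuel only makes the recursion total (n decreases every iteration)
def maxPrizeLoop (fuel : Nat) (n : Int) (prizes : List Int) : List Int :=
  match fuel with
  | 0 => prizes
  | fuel' + 1 =>
    match PySem.List.max? prizes (fun y => y) with
    | none => prizes            -- dead: prizes is never empty (Python max would raise)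
    | some maxx =>
      if maxx < n then
        if (n - (maxx + 1)) ∉ prizes then
          maxPrizeLoop fuel' (n - (maxx + 1)) (prizes ++ [maxx + 1])
        else
          maxPrizeLoop fuel' n (prizes ++ [n])
      else prizes

def max_prize (n : Int) : List Int :=
  if n = 1 then [1]
  else if n = 2 then [2]
  else
    match PySem.List.remove? (maxPrizeLoop (n.toNat + 1) n [0]) 0 with
    | some l => PySem.List.sorted l (fun x => x) false
    | none => []                -- dead: 0 is always in prizes (Python remove would raise)

-- ===== PORT B =====
-- the while-loop of B: increment k while (k+1)(k+2)//2 ≤ n; fuel only makes it total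
def findK (fuel : Nat) (n : Int) (k : Int) : Int :=
  match fuel with
  | 0 => k
  | fuel' + 1 =>
    if PySem.Int.floordiv ((k + 1) * (k + 2)) 2 ≤ n then findK fuel' n (k + 1) else k

def max_prize_alt (n : Int) : List Int :=
  if n ≤ 0 then []
  else
    let k := findK n.toNat n 1
    let rem := n - PySem.Int.floordiv (k * (k + 1)) 2
    PySem.List.pyRange 1 k 1 ++ [k + rem]

-- ===== PRECONDITION & SPEC =====
-- For n ≥ 5 with n+1 triangular (n = k(k+1)/2 - 1), A drops the final remainder and returns a list
-- summing to less than n (at the witness n=5 it returns [1, 2]), while B returns a maximal distinct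
-- partition actually summing to n ([1, 4] at n=5), which is the intended prize partition.
-- n ≥ 5 and 8n+9 is a perfect square (⟺ n+1 is triangular): the foldr computes ⌊√(8n+9)⌋ bit by bit
def D_max_prize (n : Int) : Prop := 5 ≤ n ∧ (List.range 18).foldr (fun i s => let t := s + 2 ^ i; if t * t ≤ 8 * n + 9 then t else s) 0 ^ 2 = 8 * n + 9
instance (n : Int) : Decidable (D_max_prize n) := by unfold D_max_prize; infer_instance

def Spec_max_prize (n : Int) (out : List Int) : Prop := ¬ D_max_prize n → out = max_prize_alt n
instance (n : Int) (out : List Int) : Decidable (Spec_max_prize n out) := by unfold Spec_max_prize; infer_instance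

def pvDiffWitness_max_prize : Int := 5
def pvDiffWitnessOut_max_prize : (List Int) × (List Int) := ([1, 2], [1, 4])

-- ===== CLAIM (what is proved, stated in full; the proofs are below) =====
def Claim_unchanged_max_prize : Prop := ∀ (n : Int), Dom_max_prize n → Spec_max_prize n (max_prize n)
def Claim_changed_max_prize : Prop := Dom_max_prize (pvDiffWitness_max_prize) ∧ D_max_prize (pvDiffWitness_max_prize) ∧ max_prize (pvDiffWitness_max_prize) = pvDiffWitnessOut_max_prize.1 ∧ max_prize_alt (pvDiffWitness_max_prize) = pvDiffWitnessOut_max_prize.2 ∧ pvDiffWitnessOut_max_prize.1 ≠ pvDiffWitnessOut_max_prize.2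
def Claim_exact_max_prize : Prop := ∀ (n : Int), Dom_max_prize n → D_max_prize n → max_prize n ≠ max_prize_alt n

-- ===== LEMMAS AND PROOFS =====

-- the foldr in D_max_prize, as a named function of the radicand, bit count and start value
def isqrtFold (m : Int) (L : Nat) (j0 : Int) : Int :=
  (List.range L).foldr (fun i s => let t := s + 2 ^ i; if t * t ≤ m then t else s) j0

lemma isqrtFold_spec (m : Int) : ∀ (L : Nat) (j0 : Int), 0 ≤ j0 → j0 * j0 ≤ m →
    m < (j0 + 2 ^ L) * (j0 + 2 ^ L) →
    j0 ≤ isqrtFold m L j0 ∧ isqrtFold m L j0 * isqrtFold m L j0 ≤ m ∧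
      m < (isqrtFold m L j0 + 1) * (isqrtFold m L j0 + 1) := by
  intro L
  induction L with
  | zero =>
    intro j0 h0 h1 h2
    refine ⟨le_refl _, h1, ?_⟩
    simpa [isqrtFold] using h2
  | succ L ih =>
    intro j0 h0 h1 h2
    have hrw : isqrtFold m (L + 1) j0 =
        isqrtFold m L (if (j0 + 2 ^ L) * (j0 + 2 ^ L) ≤ m then j0 + 2 ^ L else j0) := by
      simp only [isqrtFold, List.range_succ, List.foldr_append, List.foldr_cons, List.foldr_nil]
    have hp : (0:Int) < 2 ^ L := by positivity
    rw [hrw]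
    split_ifs with ht
    · have hnext : m < (j0 + 2 ^ L + 2 ^ L) * (j0 + 2 ^ L + 2 ^ L) := by
        have he : (2:Int) ^ (L + 1) = 2 ^ L + 2 ^ L := by ring
        rw [he] at h2
        have harr : j0 + (2 ^ L + 2 ^ L) = j0 + 2 ^ L + 2 ^ L := by ring
        rw [harr] at h2
        exact h2
      have h := ih (j0 + 2 ^ L) (by omega) ht hnext
      exact ⟨le_trans (by omega) h.1, h.2⟩
    · exact ih j0 h0 h1 (by omega)

-- k-th triangular number (with Int floor division, = Python k*(k+1)//2 for k ≥ 0)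
def Tri (k : Int) : Int := k * (k + 1) / 2

lemma two_Tri (k : Int) : 2 * Tri k = k * (k + 1) := by
  obtain ⟨m, hm⟩ := Int.even_mul_succ_self k
  unfold Tri; omega

lemma Tri_succ (k : Int) : Tri (k + 1) = Tri k + (k + 1) := by
  have h1 := two_Tri k; have h2 := two_Tri (k + 1); nlinarith

lemma Tri_mono {a b : Int} (h0 : 0 ≤ a) (h : a ≤ b) : Tri a ≤ Tri b := by
  have h1 := two_Tri a; have h2 := two_Tri b; nlinarith

-- max(l) = m when m ∈ l bounds l from above
lemma max?_id_eq_of {l : List Int} {m : Int} (h1 : m ∈ l) (h2 : ∀ y ∈ l, y ≤ m) :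
    PySem.List.max? l (fun y => y) = some m := by
  cases l with
  | nil => cases h1
  | cons x t =>
    rw [PySem.List.max?_id_cons]
    have hle := PySem.List.le_foldl_max t x
    have hmem := PySem.List.foldl_max_mem t x
    have h3 : t.foldl max x ≤ m := by
      rcases hmem with h | h
      · rw [h]; exact h2 x List.mem_cons_self
      · exact h2 _ (List.mem_cons_of_mem _ h)
    have h4 : m ≤ t.foldl max x := by
      rcases List.mem_cons.mp h1 with h | h
      · subst h; exact hle.1
      · exact hle.2 _ h
    exact congrArg some (le_antisymm h3 h4)

lemma max?_pyRange (m : Int) (_hm : 0 ≤ m) :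
    PySem.List.max? (PySem.List.pyRange 0 (m + 1) 1) (fun y => y) = some m := by
  apply max?_id_eq_of
  · rw [PySem.List.mem_pyRange_one]; omega
  · intro y hy; rw [PySem.List.mem_pyRange_one] at hy; omega

lemma max?_pyRange_append (m r : Int) (_hm : 0 ≤ m) (hr : m < r) :
    PySem.List.max? (PySem.List.pyRange 0 (m + 1) 1 ++ [r]) (fun y => y) = some r := by
  apply max?_id_eq_of
  · simp
  · intro y hy
    rcases List.mem_append.mp hy with h | h
    · rw [PySem.List.mem_pyRange_one] at h; omega
    · simp at h; omega

-- proof-side description of A's loop from state (r, prizes = [0..m])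
def specA (r m : Int) : List Int :=
  if h : 0 ≤ m ∧ m < r then
    if r ≤ 2 * m + 1 then PySem.List.pyRange 0 (m + 1) 1 ++ [r]
    else specA (r - (m + 1)) (m + 1)
  else PySem.List.pyRange 0 (m + 1) 1
termination_by r.toNat
decreasing_by omega

lemma loop_eq_specA : ∀ (fuel : Nat) (r m : Int), 0 ≤ m → r < (fuel : Int) →
    maxPrizeLoop fuel r (PySem.List.pyRange 0 (m + 1) 1) = specA r m := by
  intro fuel
  induction fuel with
  | zero =>
    intro r m hm hf
    rw [specA, dif_neg (by omega)]
    rfl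
  | succ f ih =>
    intro r m hm hf
    simp only [maxPrizeLoop]
    rw [max?_pyRange m hm]
    dsimp only
    by_cases hmr : m < r
    · rw [if_pos hmr]
      have hmem : (r - (m + 1)) ∈ PySem.List.pyRange 0 (m + 1) 1 ↔ r ≤ 2 * m + 1 := by
        rw [PySem.List.mem_pyRange_one]; omega
      by_cases hsmall : r ≤ 2 * m + 1
      · -- remainder already present: append r, then the loop exits
        rw [if_neg (by simp only [hmem]; omega)]
        have hf1 : ∃ f', f = f' + 1 := by
          rcases f with _ | f'
          · exfalso; simp at hf; omega
          · exact ⟨f', rfl⟩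
        obtain ⟨f', rfl⟩ := hf1
        simp only [maxPrizeLoop]
        rw [max?_pyRange_append m r hm hmr]
        dsimp only
        rw [if_neg (by omega)]
        conv_rhs => rw [specA]
        rw [dif_pos ⟨hm, hmr⟩, if_pos hsmall]
      · -- take maxx+1 and recurse
        rw [if_pos (by simp only [hmem]; omega)]
        have hstep : PySem.List.pyRange 0 (m + 1) 1 ++ [m + 1] = PySem.List.pyRange 0 ((m + 1) + 1) 1 := by
          rw [PySem.List.pyRange_one_succ_right (by omega : (0:Int) ≤ m + 1)]
        rw [hstep, ih (r - (m + 1)) (m + 1) (by omega) (by push_cast at hf ⊢; omega)]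
        conv_rhs => rw [specA]
        rw [dif_pos ⟨hm, hmr⟩, if_neg hsmall]
    · rw [if_neg hmr, specA, dif_neg (by omega)]

lemma specA_closed (K : Int) (n : Int) (hK3 : Tri K ≤ n) (hK4 : n < Tri (K + 1)) :
    ∀ (m : Int), 0 ≤ m → m + 1 ≤ K →
    specA (n - Tri m) m =
      if n = Tri (K + 1) - 1 then PySem.List.pyRange 0 (K + 1) 1
      else PySem.List.pyRange 0 K 1 ++ [n - Tri (K - 1)] := by
  intro m
  induction hd : (K - m).toNat using Nat.strong_induction_on generalizing m with
  | _ d ih =>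
  intro hm hmK
  have hTm1 : Tri (m + 1) = Tri m + (m + 1) := Tri_succ m
  have hTm2 := Tri_succ (m + 1)
  have hge : Tri (m + 1) ≤ n := le_trans (Tri_mono (by omega) hmK) hK3
  have hlt : m < n - Tri m := by omega
  rw [specA, dif_pos ⟨hm, hlt⟩]
  by_cases hsmall : n - Tri m ≤ 2 * m + 1
  · rw [if_pos hsmall]
    have hK_eq : m + 1 = K := by
      by_contra hne
      have h2K : m + 1 + 1 ≤ K := by omega
      have : Tri (m + 1 + 1) ≤ n := le_trans (Tri_mono (by omega) h2K) hK3
      omega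
    have hnotbug : n ≠ Tri (K + 1) - 1 := by
      intro hbug
      rw [← hK_eq] at hbug
      omega
    rw [if_neg hnotbug, ← hK_eq, show m + 1 - 1 = m from by omega]
  · rw [if_neg hsmall]
    have harg : n - Tri m - (m + 1) = n - Tri (m + 1) := by omega
    rw [harg]
    by_cases hK_lt : m + 1 + 1 ≤ K
    · exact ih ((K - (m + 1)).toNat) (by omega) (m + 1) rfl (by omega) (by omega)
    · -- m + 1 = K and the remainder case: n = Tri (K+1) - 1
      have hK_eq : m + 1 = K := by omega
      subst hK_eq
      have hbug : n = Tri (m + 1 + 1) - 1 := by omega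
      rw [if_pos hbug]
      have harg2 : n - Tri (m + 1) = m + 1 := by omega
      rw [harg2, specA, dif_neg (by omega)]

lemma floordiv_Tri (k : Int) : PySem.Int.floordiv ((k + 1) * (k + 2)) 2 = Tri (k + 1) := by
  rw [PySem.Int.floordiv_eq_ediv_of_pos (by omega)]
  unfold Tri
  ring_nf

lemma findK_eq (K : Int) (n : Int) (hK3 : Tri K ≤ n) (hK4 : n < Tri (K + 1)) :
    ∀ (fuel : Nat) (k : Int), 0 ≤ k → k ≤ K → K - k < (fuel : Int) → findK fuel n k = K := by
  intro fuel
  induction fuel with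
  | zero => intro k h0 hk hf; simp at hf; omega
  | succ f ih =>
    intro k h0 hk hf
    simp only [findK, floordiv_Tri]
    by_cases hkK : k = K
    · subst hkK
      rw [if_neg (by omega)]
    · have hlt : k + 1 ≤ K := by omega
      rw [if_pos (le_trans (Tri_mono (by omega) hlt) hK3)]
      exact ih (k + 1) (by omega) hlt (by push_cast at hf ⊢; omega)

lemma exists_K (n : Int) (h : 1 ≤ n) : ∃ K : Int, 1 ≤ K ∧ Tri K ≤ n ∧ n < Tri (K + 1) := by
  induction n, h using Int.le_induction with
  | base => exact ⟨1, by norm_num, by unfold Tri; norm_num, by unfold Tri; norm_num⟩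
  | succ n hn ih =>
    obtain ⟨K, hK1, hK2, hK3⟩ := ih
    by_cases hcase : n + 1 < Tri (K + 1)
    · exact ⟨K, hK1, by omega, hcase⟩
    · refine ⟨K + 1, by omega, by omega, ?_⟩
      have h1 : Tri (K + 1 + 1) = Tri (K + 1) + (K + 1 + 1) := Tri_succ (K + 1)
      omega

lemma K_le (K n : Int) (hK1 : 1 ≤ K) (hK3 : Tri K ≤ n) : K ≤ n := by
  have h := two_Tri K; nlinarith

lemma sorted_range_append (a b x : Int) (hx : b ≤ x + 1) :
    PySem.List.sorted (PySem.List.pyRange a b 1 ++ [x]) (fun y => y) false =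
      PySem.List.pyRange a b 1 ++ [x] := by
  apply PySem.List.sorted_eq_self_of_pairwise
  apply List.pairwise_append.mpr
  refine ⟨List.Pairwise.imp (fun h => le_of_lt h) (PySem.List.pairwise_lt_pyRange_one _ _), List.pairwise_singleton _ _, ?_⟩
  intro y hy z hz
  rw [PySem.List.mem_pyRange_one] at hy
  simp at hz
  omega

-- A on n ≥ 3, in terms of the K with Tri K ≤ n < Tri (K+1)
lemma max_prize_eq_big (n K : Int) (h3 : 3 ≤ n) (hK1 : 1 ≤ K) (hK3 : Tri K ≤ n) (hK4 : n < Tri (K + 1)) :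
    max_prize n = if n = Tri (K + 1) - 1 then PySem.List.pyRange 1 (K + 1) 1
                  else PySem.List.pyRange 1 K 1 ++ [n - Tri (K - 1)] := by
  rw [max_prize, if_neg (by omega), if_neg (by omega)]
  have h0 : [(0:Int)] = PySem.List.pyRange 0 (0 + 1) 1 := by decide
  have hT0 : n - Tri 0 = n := by unfold Tri; norm_num
  have hcl := specA_closed K n hK3 hK4 0 le_rfl hK1
  rw [hT0] at hcl
  rw [h0, loop_eq_specA _ n 0 le_rfl (by push_cast; omega), hcl]
  split_ifs with hbug
  · rw [PySem.List.pyRange_one_cons (by omega : (0:Int) < K + 1),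
        show (0:Int) + 1 = 1 from by norm_num, PySem.List.remove?_cons_self]
    apply PySem.List.sorted_eq_self_of_pairwise
    exact List.Pairwise.imp (fun h => le_of_lt h) (PySem.List.pairwise_lt_pyRange_one _ _)
  · rw [PySem.List.pyRange_one_cons (by omega : (0:Int) < K),
        show (0:Int) + 1 = 1 from by norm_num, List.cons_append, PySem.List.remove?_cons_self]
    have hTK : Tri (K - 1 + 1) = Tri (K - 1) + (K - 1 + 1) := Tri_succ (K - 1)
    rw [show K - 1 + 1 = K from by omega] at hTK
    exact sorted_range_append 1 K (n - Tri (K - 1)) (by omega)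

-- B on n ≥ 3, in terms of the same K
lemma max_prize_alt_eq_big (n K : Int) (h3 : 3 ≤ n) (hK1 : 1 ≤ K) (hK3 : Tri K ≤ n) (hK4 : n < Tri (K + 1)) :
    max_prize_alt n = PySem.List.pyRange 1 K 1 ++ [K + (n - Tri K)] := by
  rw [max_prize_alt, if_neg (by omega)]
  have hKn : K ≤ n := K_le K n hK1 hK3
  have hfind : findK n.toNat n 1 = K :=
    findK_eq K n hK3 hK4 n.toNat 1 (by omega) hK1 (by omega)
  simp only [hfind]
  rw [PySem.Int.floordiv_eq_ediv_of_pos (by omega)]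
  rfl

-- ===== VERDICT (by name: the statement is the Claim_ definition above) =====
theorem max_prize_spec : Claim_unchanged_max_prize := by
  intro n hdom hnD
  by_cases h0 : n ≤ 0
  · -- the loop never runs: both return []
    rw [max_prize, if_neg (by omega), if_neg (by omega)]
    have h0' : [(0:Int)] = PySem.List.pyRange 0 (0 + 1) 1 := by decide
    rw [h0', loop_eq_specA _ n 0 le_rfl (by push_cast; omega), specA, dif_neg (by omega)]
    rw [max_prize_alt, if_pos h0]
    decide
  · rcases (by omega : n < 3 ∨ 3 ≤ n) with h3 | h3
    · -- n = 1 or n = 2: A's special cases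
      interval_cases n <;> decide
    · obtain ⟨K, hK1, hK3, hK4⟩ := exists_K n (by omega)
      have hnotbug : n ≠ Tri (K + 1) - 1 := by
        intro hbug
        apply hnD
        have hK2 : 2 ≤ K := by
          by_contra hlt
          have : K = 1 := by omega
          subst this
          have : Tri (1 + 1) = 3 := by decide
          omega
        have h2T := two_Tri (K + 1)
        have h5 : 5 ≤ n := by nlinarith
        refine ⟨h5, ?_⟩
        show isqrtFold (8 * n + 9) 18 0 ^ 2 = 8 * n + 9
        have hdm : n ≤ 2147483648 := by
          simp only [Dom_max_prize, pvDomInt, decide_eq_true_eq] at hdom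
          omega
        have hbound : 8 * n + 9 < ((0:Int) + 2 ^ 18) * ((0:Int) + 2 ^ 18) := by norm_num; omega
        obtain ⟨hr0, hr1, hr2⟩ := isqrtFold_spec (8 * n + 9) 18 0 le_rfl (by omega) hbound
        have hsq : 8 * n + 9 = (2 * K + 3) * (2 * K + 3) := by nlinarith
        have hrK : isqrtFold (8 * n + 9) 18 0 = 2 * K + 3 := by nlinarith
        rw [hrK, pow_two]
        omega
      rw [max_prize_eq_big n K h3 hK1 hK3 hK4, if_neg hnotbug,
          max_prize_alt_eq_big n K h3 hK1 hK3 hK4]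
      have hTK : Tri (K - 1 + 1) = Tri (K - 1) + (K - 1 + 1) := Tri_succ (K - 1)
      rw [show K - 1 + 1 = K from by omega] at hTK
      congr 1
      rw [List.cons.injEq]
      constructor
      · omega
      · rfl

theorem max_prize_changed : Claim_changed_max_prize := by
  unfold Claim_changed_max_prize; decide

theorem max_prize_tight : Claim_exact_max_prize := by
  intro n hdom hD heq
  obtain ⟨h5, htri⟩ := hD
  have hsq : isqrtFold (8 * n + 9) 18 0 ^ 2 = 8 * n + 9 := htri
  have hdm : n ≤ 2147483648 := by
    simp only [Dom_max_prize, pvDomInt, decide_eq_true_eq] at hdom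
    omega
  have hbound : 8 * n + 9 < ((0:Int) + 2 ^ 18) * ((0:Int) + 2 ^ 18) := by norm_num; omega
  obtain ⟨hr0, hr1, hr2⟩ := isqrtFold_spec (8 * n + 9) 18 0 le_rfl (by omega) hbound
  rw [pow_two] at hsq
  -- the root is odd: write it as 2j+1 and get j*(j+1) = 2*(n+1)
  obtain ⟨j, hj, hjeq, hj0⟩ : ∃ j : Int, isqrtFold (8 * n + 9) 18 0 = 2 * j + 1 ∧
      j * (j + 1) = 2 * (n + 1) ∧ 0 ≤ j := by
    rcases Int.even_or_odd (isqrtFold (8 * n + 9) 18 0) with ⟨k, hk⟩ | ⟨k, hk⟩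
    · exfalso
      rw [hk] at hsq
      have ha : (k + k) * (k + k) = 4 * (k * k) := by ring
      omega
    · refine ⟨k, hk, ?_, by omega⟩
      rw [hk] at hsq
      have ha : (2 * k + 1) * (2 * k + 1) = 4 * (k * (k + 1)) + 1 := by ring
      omega
  obtain ⟨K, hK1, hK3, hK4⟩ := exists_K n (by omega)
  have h2T := two_Tri (K + 1)
  have h2TK := two_Tri K
  have hjK : (j:Int) = K + 1 := by
    by_contra hne
    rcases (by omega : (j:Int) < K + 1 ∨ K + 1 ≤ (j:Int)) with h | h
    · nlinarith
    · have : K + 2 ≤ (j:Int) := by omega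
      nlinarith
  have hbug : n = Tri (K + 1) - 1 := by
    rw [hjK] at hjeq
    omega
  have hK2 : 2 ≤ K := by
    by_contra hlt
    have : K = 1 := by omega
    subst this
    have : Tri (1 + 1) = 3 := by decide
    omega
  rw [max_prize_eq_big n K (by omega) hK1 hK3 hK4, if_pos hbug,
      max_prize_alt_eq_big n K (by omega) hK1 hK3 hK4] at heq
  have hTK : Tri (K + 1) = Tri K + (K + 1) := Tri_succ K
  rw [PySem.List.pyRange_one_succ_right hK1] at heq
  have := List.append_cancel_left heq
  rw [List.cons.injEq] at this
  omega
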